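-- pv_equiv track=rewrite | github.com/saparia-data/data_structure | geeksforgeeks/queue/generate_numbers_with_given_digits.py | printDigits
-- ===== SOURCE A (Python) =====
-- from queue import Queue
--
-- def printDigits(n1, n2, n):
--
--     q = Queue()
--     q.put(str(n1))
--     q.put(str(n2))
--
--     res = []
--
--
--     while(n > 0):
--         n -= 1
--         curr = q.get()
--
--         res.append(curr)
--
--         q.put(curr + "5")
--         q.put(curr + "6")
--
--     return res
-- ===== SOURCE B (Python) =====
-- def printDigits(n1, n2, n):
--     # Closed-form: output index i corresponds to node j = i+2 in the implicit
--     # binary heap; j's binary digits after the leading 1 pick the root and the suffix.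
--     res = []
--     i = 0
--     while n > 0:
--         n -= 1
--         j = i + 2
--         bits = []
--         while j > 1:
--             bits.append(j % 2)
--             j //= 2
--         bits.reverse()
--         s = str(n1) if bits[0] == 0 else str(n2)
--         for b in bits[1:]:
--             s += "5" if b == 0 else "6"
--         res.append(s)
--         i += 1
--     return res
-- ===== Notes on version B (the rewrite author's own statement) =====
-- stated objective: alternative
-- what changed: Replaced the BFS queue (pop front, push front+'5' and front+'6') by a closed-form per-index computation: output i is read off the binary digits of i+2, the first digit after the leading 1 choosing the root and each later digit mapping to '5'/'6'.
import Mathlib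
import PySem

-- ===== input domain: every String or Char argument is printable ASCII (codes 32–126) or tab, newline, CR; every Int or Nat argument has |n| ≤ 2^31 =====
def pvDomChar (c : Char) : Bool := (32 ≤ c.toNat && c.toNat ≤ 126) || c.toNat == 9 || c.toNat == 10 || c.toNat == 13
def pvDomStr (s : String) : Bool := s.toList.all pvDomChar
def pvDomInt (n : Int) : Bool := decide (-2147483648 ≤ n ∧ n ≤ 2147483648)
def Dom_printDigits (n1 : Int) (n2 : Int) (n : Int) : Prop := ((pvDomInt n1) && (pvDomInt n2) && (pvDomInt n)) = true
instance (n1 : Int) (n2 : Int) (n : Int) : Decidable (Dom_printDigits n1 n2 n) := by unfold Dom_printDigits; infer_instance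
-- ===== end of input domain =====

-- B replaces A's BFS queue by a closed-form per-index computation (binary digits
-- of i+2 pick the root and the "5"/"6" suffix); objective: alternative decomposition.

-- ===== PORT A =====
-- the while loop of A: one iteration pops the queue front, appends it to res,
-- and pushes front+"5", front+"6"; fuel = number of remaining iterations (n > 0 test)
def printDigitsLoopA (q : List String) (res : List String) : Nat → List String
  | 0 => res
  | k + 1 =>
    match q with
    | [] => res          -- unreachable: the queue always holds ≥ 2 elements
    | curr :: t => printDigitsLoopA (t ++ [curr ++ "5", curr ++ "6"]) (res ++ [curr]) k

def printDigits (n1 : Int) (n2 : Int) (n : Int) : List String :=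
  printDigitsLoopA [PySem.Int.toStr n1, PySem.Int.toStr n2] [] n.toNat

-- ===== PORT B =====
-- inner while of B: binary digits of j (LSB first), stopping when j becomes 1
def printDigitsBits (j : Nat) : List Nat :=
  if j ≤ 1 then [] else j % 2 :: printDigitsBits (j / 2)
decreasing_by omega

-- the body of B's loop for index i: build the string for node j = i + 2
def printDigitsBuild (n1 n2 : Int) (j : Nat) : String :=
  match (printDigitsBits j).reverse with
  | [] => ""            -- unreachable: j ≥ 2 so the bit list is nonempty
  | b :: rest =>
    rest.foldl (fun s c => s ++ (if c = 0 then "5" else "6"))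
      (if b = 0 then PySem.Int.toStr n1 else PySem.Int.toStr n2)

-- outer while of B: i counts up, fuel counts the remaining iterations
def printDigitsLoopB (n1 n2 : Int) (res : List String) (i : Nat) : Nat → List String
  | 0 => res
  | k + 1 => printDigitsLoopB n1 n2 (res ++ [printDigitsBuild n1 n2 (i + 2)]) (i + 1) k

def printDigits_alt (n1 : Int) (n2 : Int) (n : Int) : List String :=
  printDigitsLoopB n1 n2 [] 0 n.toNat

-- ===== PRECONDITION & SPEC =====
def Spec_printDigits (n1 : Int) (n2 : Int) (n : Int) (out : List String) : Prop := out = printDigits_alt n1 n2 n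
instance (n1 : Int) (n2 : Int) (n : Int) (out : List String) : Decidable (Spec_printDigits n1 n2 n out) := by unfold Spec_printDigits; infer_instance

-- ===== CLAIM (what is proved, stated in full; the proofs are below) =====
def Claim_equal_printDigits : Prop := ∀ (n1 : Int) (n2 : Int) (n : Int), Dom_printDigits n1 n2 n → Spec_printDigits n1 n2 n (printDigits n1 n2 n)

-- ===== LEMMAS AND PROOFS =====

-- the BFS sequence, indexed by heap position j (j ≥ 2; roots at 2 and 3)
def bfsNode (n1 n2 : Int) (j : Nat) : String :=
  if j < 4 then (if j % 2 = 0 then PySem.Int.toStr n1 else PySem.Int.toStr n2)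
  else bfsNode n1 n2 (j / 2) ++ (if j % 2 = 0 then "5" else "6")
decreasing_by omega

-- the segment [bfsNode a, bfsNode (a+1), …, bfsNode (a+len-1)]
def bfsSeg (n1 n2 : Int) (a len : Nat) : List String :=
  (List.range len).map (fun t => bfsNode n1 n2 (a + t))

theorem bfsSeg_cons (n1 n2 : Int) (a len : Nat) :
    bfsSeg n1 n2 a (len + 1) = bfsNode n1 n2 a :: bfsSeg n1 n2 (a + 1) len := by
  simp only [bfsSeg, List.range_succ_eq_map, List.map_cons, List.map_map, Nat.add_zero]
  refine congrArg _ (List.map_congr_left fun t _ => ?_)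
  simp [Function.comp]
  congr 1
  omega

theorem bfsSeg_snoc (n1 n2 : Int) (a len : Nat) :
    bfsSeg n1 n2 a (len + 1) = bfsSeg n1 n2 a len ++ [bfsNode n1 n2 (a + len)] := by
  simp [bfsSeg, List.range_succ]

theorem bfsSeg_snoc2 (n1 n2 : Int) (a len : Nat) :
    bfsSeg n1 n2 a (len + 2) = bfsSeg n1 n2 a len ++
      [bfsNode n1 n2 (a + len), bfsNode n1 n2 (a + len + 1)] := by
  rw [show len + 2 = (len + 1) + 1 from rfl, bfsSeg_snoc, bfsSeg_snoc]
  simp [show a + (len + 1) = a + len + 1 by omega]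

theorem bfsNode_even (n1 n2 : Int) (j : Nat) (h : 2 ≤ j) :
    bfsNode n1 n2 (2 * j) = bfsNode n1 n2 j ++ "5" := by
  rw [bfsNode]
  have h4 : ¬ (2 * j < 4) := by omega
  simp [h4, (by omega : (2 * j) / 2 = j), (by omega : (2 * j) % 2 = 0)]

theorem bfsNode_odd (n1 n2 : Int) (j : Nat) (h : 2 ≤ j) :
    bfsNode n1 n2 (2 * j + 1) = bfsNode n1 n2 j ++ "6" := by
  rw [bfsNode]
  have h4 : ¬ (2 * j + 1 < 4) := by omega
  simp [h4, (by omega : (2 * j + 1) / 2 = j), (by omega : (2 * j + 1) % 2 = 1)]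

theorem printDigitsBits_nonempty (j : Nat) (h : 2 ≤ j) : printDigitsBits j ≠ [] := by
  rw [printDigitsBits]
  simp [Nat.not_le.mpr (by omega : 1 < j)]

-- B's per-index computation equals the BFS node
theorem build_eq_bfsNode (n1 n2 : Int) (j : Nat) (h : 2 ≤ j) :
    printDigitsBuild n1 n2 j = bfsNode n1 n2 j := by
  induction j using Nat.strong_induction_on with
  | _ j ih =>
    by_cases h4 : j < 4
    · interval_cases j <;> (rw [bfsNode]) <;> simp [printDigitsBuild, printDigitsBits]
    · have h2 : 2 ≤ j / 2 := by omega
      have hbits : printDigitsBits j = j % 2 :: printDigitsBits (j / 2) := by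
        rw [printDigitsBits]; simp [Nat.not_le.mpr (by omega : 1 < j)]
      have hne := printDigitsBits_nonempty (j / 2) h2
      obtain ⟨b, rest, hbr⟩ : ∃ b rest, (printDigitsBits (j / 2)).reverse = b :: rest := by
        cases hrev : (printDigitsBits (j / 2)).reverse with
        | nil => exact absurd (List.reverse_eq_nil_iff.mp hrev) hne
        | cons b rest => exact ⟨b, rest, rfl⟩
      have ihalf := ih (j / 2) (by omega) h2
      rw [bfsNode]; rw [if_neg h4]
      rw [← ihalf]
      simp only [printDigitsBuild, hbits, List.reverse_cons, hbr]
      simp [List.foldl_append]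

-- A's loop invariant: the queue is the next segment of the BFS sequence
theorem loopA_inv (n1 n2 : Int) (m : Nat) : ∀ (k : Nat) (res : List String),
    printDigitsLoopA (bfsSeg n1 n2 (k + 2) (k + 2)) res m = res ++ bfsSeg n1 n2 (k + 2) m := by
  induction m with
  | zero => intro k res; simp [printDigitsLoopA, bfsSeg]
  | succ m ih =>
    intro k res
    rw [bfsSeg_cons]
    show printDigitsLoopA _ _ (m + 1) = _
    rw [printDigitsLoopA]
    have h5 : bfsNode n1 n2 (k + 2) ++ "5" = bfsNode n1 n2 (k + 3 + (k + 1)) := by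
      rw [show k + 3 + (k + 1) = 2 * (k + 2) by omega, bfsNode_even n1 n2 (k + 2) (by omega)]
    have h6 : bfsNode n1 n2 (k + 2) ++ "6" = bfsNode n1 n2 (k + 3 + (k + 1) + 1) := by
      rw [show k + 3 + (k + 1) + 1 = 2 * (k + 2) + 1 by omega,
          bfsNode_odd n1 n2 (k + 2) (by omega)]
    have hq : bfsSeg n1 n2 (k + 2 + 1) (k + 1) ++
        [bfsNode n1 n2 (k + 2) ++ "5", bfsNode n1 n2 (k + 2) ++ "6"] =
        bfsSeg n1 n2 (k + 1 + 2) (k + 1 + 2) := by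
      rw [h5, h6]
      exact (bfsSeg_snoc2 n1 n2 (k + 3) (k + 1)).symm
    rw [hq, ih (k + 1) (res ++ [bfsNode n1 n2 (k + 2)]), bfsSeg_cons]
    simp [show k + 2 + 1 = k + 1 + 2 by omega]

-- B's loop produces the same segment
theorem loopB_eq (n1 n2 : Int) (m : Nat) : ∀ (i : Nat) (res : List String),
    printDigitsLoopB n1 n2 res i m = res ++ bfsSeg n1 n2 (i + 2) m := by
  induction m with
  | zero => intro i res; simp [printDigitsLoopB, bfsSeg]
  | succ m ih =>
    intro i res
    rw [printDigitsLoopB, ih, bfsSeg_cons]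
    rw [build_eq_bfsNode n1 n2 (i + 2) (by omega)]
    simp [show i + 2 + 1 = i + 1 + 2 by omega]

-- ===== VERDICT (by name: the statement is the Claim_ definition above) =====
theorem printDigits_spec : Claim_equal_printDigits := by
  intro n1 n2 n _
  unfold Spec_printDigits printDigits printDigits_alt
  have hb2 : bfsNode n1 n2 2 = PySem.Int.toStr n1 := by rw [bfsNode]; norm_num
  have hb3 : bfsNode n1 n2 3 = PySem.Int.toStr n2 := by rw [bfsNode]; norm_num
  have hinit : [PySem.Int.toStr n1, PySem.Int.toStr n2] = bfsSeg n1 n2 (0 + 2) (0 + 2) := by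
    simp [bfsSeg, List.range_succ, hb2, hb3]
  rw [hinit, loopA_inv n1 n2 n.toNat 0 [], loopB_eq n1 n2 n.toNat 0 []]
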